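-- pv_equiv track=rewrite | github.com/AyushSharma255/TextArt | textArt/squiggle.py | squiggle
-- ===== SOURCE A (Python) =====
-- def squiggle(string, rows):
--     squiggleOfString = ""
--
--     for i in range(rows):
--         for x in range(len(string) + 1):
--             squiggleOfString += x * " " + string + "\n"
--         for x in range(len(string) + 1):
--             squiggleOfString += (len(string) - x) * " " + string + "\n"
--
--     return squiggleOfString
-- ===== SOURCE B (Python) =====
-- def squiggle(string, rows):
--     n = len(string)
--     period = 2 * n + 2
--     def indent(k):
--         j = k % period
--         return j if j <= n else 2 * n + 1 - j
--     return "".join(indent(k) * " " + string + "\n" for k in range(rows * period))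
-- ===== Notes on version B (the rewrite author's own statement) =====
-- stated objective: alternative
-- what changed: Replaces A's three nested loops (rows x ascending pass x descending pass) with a single flat pass over all line indices, computing each line's indent by a closed-form modular formula j = k mod (2n+2), indent = j if j <= n else 2n+1-j, joined in one go.
import Mathlib
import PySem

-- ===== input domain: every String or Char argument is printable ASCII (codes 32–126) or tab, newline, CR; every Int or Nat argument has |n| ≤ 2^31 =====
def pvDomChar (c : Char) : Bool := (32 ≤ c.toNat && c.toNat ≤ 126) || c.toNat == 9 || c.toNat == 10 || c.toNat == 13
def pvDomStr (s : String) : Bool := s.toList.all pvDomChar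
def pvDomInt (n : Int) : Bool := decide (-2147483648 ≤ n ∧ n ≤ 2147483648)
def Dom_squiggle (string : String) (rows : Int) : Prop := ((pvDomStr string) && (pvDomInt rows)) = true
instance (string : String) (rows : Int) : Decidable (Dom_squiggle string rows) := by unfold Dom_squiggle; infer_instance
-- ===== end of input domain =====

-- ===== PORT A =====
-- B replaces A's nested row/up/down loops by one flat pass over all line indices with a
-- closed-form modular indent (objective: simpler — no nesting, no incremental accumulator).
-- helper: one Python line  w*" " + string + "\n"  as a list of chars
def sqLine (cs : List Char) (w : Int) : List Char :=
  List.replicate w.toNat ' ' ++ cs ++ ['\n']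

def squiggle (string : String) (rows : Int) : String :=
  let cs := string.toList
  let n : Int := PySem.List.len cs
  let out : List Char :=
    (PySem.List.pyRange 0 rows 1).foldl (fun acc _ =>
      let acc := (PySem.List.pyRange 0 (n + 1) 1).foldl (fun a x => a ++ sqLine cs x) acc
      (PySem.List.pyRange 0 (n + 1) 1).foldl (fun a x => a ++ sqLine cs (n - x)) acc) []
  String.mk out

-- ===== PORT B =====
def squiggle_alt (string : String) (rows : Int) : String :=
  let cs := string.toList
  let n : Int := PySem.List.len cs
  let period : Int := 2 * n + 2
  let line : Int → List Char := fun k =>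
    let j := PySem.Int.mod k period
    let indent := if j ≤ n then j else 2 * n + 1 - j
    List.replicate indent.toNat ' ' ++ cs ++ ['\n']
  String.mk ((PySem.List.pyRange 0 (rows * period) 1).map line).flatten

-- ===== PRECONDITION & SPEC =====
def Spec_squiggle (string : String) (rows : Int) (out : String) : Prop := out = squiggle_alt string rows
instance (string : String) (rows : Int) (out : String) : Decidable (Spec_squiggle string rows out) := by unfold Spec_squiggle; infer_instance

-- ===== CLAIM (what is proved, stated in full; the proofs are below) =====
def Claim_equal_squiggle : Prop := ∀ (string : String) (rows : Int), Dom_squiggle string rows → Spec_squiggle string rows (squiggle string rows)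

-- ===== LEMMAS AND PROOFS =====
theorem flatMap_const {α β : Type} (block : List β) (l : List α) :
    l.flatMap (fun _ => block) = (List.replicate l.length block).flatten := by
  induction l with
  | nil => simp
  | cons a l ih => simp [ih, List.replicate_succ]

-- a flat pass over range (m*p) reading k % p equals m copies of the pass over range p
theorem range_mul_map_mod {α : Type} (g : Nat → α) (m p : Nat) :
    (List.range (m * p)).map (fun k => g (k % p)) =
      (List.replicate m ((List.range p).map (fun k => g (k % p)))).flatten := by
  induction m with
  | zero => simp
  | succ m ih =>
      have : (m + 1) * p = m * p + p := by ring
      rw [this, List.range_add, List.map_append, List.map_map, ih,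
        List.replicate_succ' (n := m)]
      simp only [List.flatten_append, List.flatten_cons, List.flatten_nil, List.append_nil]
      congr 1
      apply List.map_congr_left
      intro k _
      simp [Function.comp]

theorem squiggle_spec : Claim_equal_squiggle := by
  intro string rows _
  show squiggle string rows = squiggle_alt string rows
  unfold squiggle squiggle_alt
  simp only [PySem.List.foldl_append_eq_flatMap, List.append_assoc]
  set cs := string.toList with hcs
  set N := cs.length with hN
  have hlen : PySem.List.len cs = (N : Int) := by simp [PySem.List.len, hN]
  rw [hlen]
  -- the one-cycle block, as A builds it
  set blockA : List Char :=
    ((PySem.List.pyRange 0 ((N : Int) + 1) 1).flatMap (fun x => sqLine cs x) ++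
      (PySem.List.pyRange 0 ((N : Int) + 1) 1).flatMap (fun x => sqLine cs ((N : Int) - x))) with hblockA
  rw [List.nil_append, flatMap_const, PySem.List.length_pyRange_one, Int.sub_zero]
  congr 1
  -- B side: flat modular pass = rows copies of the one-cycle block
  have hp : ((2:Int) * (N:Int) + 2) = ((2 * N + 2 : Nat) : Int) := by push_cast; ring
  have htom : (rows * ((2:Int) * (N:Int) + 2)).toNat = rows.toNat * (2 * N + 2) := by
    rcases Int.lt_or_le 0 rows with h | h
    · obtain ⟨m, rfl⟩ := Int.eq_ofNat_of_zero_le (le_of_lt h)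
      rw [hp, ← Int.natCast_mul, Int.toNat_natCast, Int.toNat_natCast]
    · have h2 : (0:Int) ≤ 2 * (N:Int) + 2 := by positivity
      have h1 : rows * ((2:Int) * (N:Int) + 2) ≤ 0 := by nlinarith
      have hr0 : rows.toNat = 0 := by omega
      rw [hr0, Nat.zero_mul]
      omega
  -- the one cycle in B's indexing
  set g : Nat → List Char := fun r =>
    List.replicate (if r ≤ N then r else 2 * N + 1 - r) ' ' ++ (cs ++ ['\n']) with hg
  have hline : ∀ a : Nat,
      (fun k : Int =>
        List.replicate (if PySem.Int.mod k (2 * (N:Int) + 2) ≤ (N:Int)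
            then PySem.Int.mod k (2 * (N:Int) + 2)
            else 2 * (N:Int) + 1 - PySem.Int.mod k (2 * (N:Int) + 2)).toNat ' ' ++ (cs ++ ['\n']))
        ((a : Int)) = g (a % (2 * N + 2)) := by
    intro a
    have hmod : PySem.Int.mod (a : Int) (2 * (N:Int) + 2) = ((a % (2 * N + 2) : Nat) : Int) := by
      rw [PySem.Int.mod_eq_emod_of_pos (by omega), hp]
      omega
    have hlt : a % (2 * N + 2) < 2 * N + 2 := Nat.mod_lt _ (by omega)
    simp only [hmod, hg]
    by_cases hc : a % (2 * N + 2) ≤ N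
    · rw [if_pos (by exact_mod_cast hc), if_pos hc, Int.toNat_natCast]
    · rw [if_neg (by exact_mod_cast hc), if_neg hc]
      congr 1
      congr 1
      generalize a % (2 * N + 2) = t at hc hlt ⊢
      omega
  have hcycle : blockA = ((List.range (2 * N + 2)).map (fun k => g (k % (2 * N + 2)))).flatten := by
    have hsplit : 2 * N + 2 = (N + 1) + (N + 1) := by omega
    rw [hsplit, List.range_add, List.map_append, List.flatten_append, hblockA]
    congr 1
    · rw [PySem.List.pyRange_one, List.flatMap_def]
      simp only [Int.sub_zero]
      have : ((N:Int) + 1).toNat = N + 1 := by omega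
      rw [this, List.map_map]
      congr 1
      apply List.map_congr_left
      intro k hk
      rw [List.mem_range] at hk
      simp [Function.comp, hg, sqLine]
      rw [Nat.mod_eq_of_lt (by omega : k < N + 1 + (N + 1)), if_pos (by omega : k ≤ N)]
    · rw [PySem.List.pyRange_one, List.flatMap_def]
      simp only [Int.sub_zero]
      have : ((N:Int) + 1).toNat = N + 1 := by omega
      rw [this, List.map_map, List.map_map]
      congr 1
      apply List.map_congr_left
      intro k hk
      rw [List.mem_range] at hk
      simp [Function.comp, hg, sqLine]
      rw [Nat.mod_eq_of_lt (by omega : N + 1 + k < N + 1 + (N + 1)), if_neg (by omega : ¬ (N + 1 + k ≤ N))]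
      omega
  have hflat : ∀ (m : Nat) (L : List (List Char)),
      (List.replicate m L.flatten).flatten = ((List.replicate m L).flatten).flatten := by
    intro m L
    induction m with
    | zero => simp
    | succ m ih => simp [List.replicate_succ, ih]
  rw [hcycle, hflat, ← range_mul_map_mod]
  rw [PySem.List.pyRange_one]
  simp only [Int.sub_zero]
  rw [htom] at *
  rw [htom, List.map_map]
  congr 1
  apply List.map_congr_left
  intro a _
  simp only [Function.comp, Int.zero_add]
  exact (hline a).symm
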